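-- pv_equiv track=rewrite | github.com/YaswanthPalepu/Tech_Demo_Project_POC | src/framework_handlers/fastapi_handler.py | _guess_app_module
-- ===== SOURCE A (Python) =====
-- from typing import Any, Dict, List, Optional
--
-- def _guess_app_module(analysis: Dict[str, Any]) -> str:
--     """
--     Try to guess the main module path that exposes `app`.
--     Uses project_structure.module_paths and simple heuristics.
--     """
--     ps = analysis.get("project_structure", {})
--     module_paths = list(ps.get("module_paths", {}).keys()) if isinstance(ps, dict) else []
--     # Prefer 'main.py', then 'app.py', then anything containing 'api'
--     for pref in ("main.py", "app.py"):
--         for p in module_paths: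
--             if p.lower().endswith(pref):
--                 return p.replace("/", ".").replace("\\", ".").rstrip(".py")
--     for p in module_paths:
--         if "api" in p.lower():
--             return p.replace("/", ".").replace("\\", ".").rstrip(".py")
--     # Fallback: first path if any
--     if module_paths:
--         return module_paths[0].replace("/", ".").replace("\\", ".").rstrip(".py")
--     return "main"
-- ===== SOURCE B (Python) =====
-- def _guess_app_module(analysis):
--     ps = analysis.get("project_structure", {})
--     module_paths = list(ps.get("module_paths", {}).keys()) if isinstance(ps, dict) else []
--     if not module_paths:
--         return "main"
--
--     def rank(p):
--         q = p.lower()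
--         if q.endswith("main.py"):
--             return 0
--         if q.endswith("app.py"):
--             return 1
--         if "api" in q:
--             return 2
--         return 3
--
--     best = min(module_paths, key=rank)
--     return best.replace("/", ".").replace("\\", ".").rstrip(".py")
-- ===== Notes on version B (the rewrite author's own statement) =====
-- stated objective: simpler
-- what changed: Replaces the three sequential priority scans plus a separate fallback with a single rank function and one stable min(key=rank) pass over the paths (first path of lowest rank; empty list handled up front).
import Mathlib
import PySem

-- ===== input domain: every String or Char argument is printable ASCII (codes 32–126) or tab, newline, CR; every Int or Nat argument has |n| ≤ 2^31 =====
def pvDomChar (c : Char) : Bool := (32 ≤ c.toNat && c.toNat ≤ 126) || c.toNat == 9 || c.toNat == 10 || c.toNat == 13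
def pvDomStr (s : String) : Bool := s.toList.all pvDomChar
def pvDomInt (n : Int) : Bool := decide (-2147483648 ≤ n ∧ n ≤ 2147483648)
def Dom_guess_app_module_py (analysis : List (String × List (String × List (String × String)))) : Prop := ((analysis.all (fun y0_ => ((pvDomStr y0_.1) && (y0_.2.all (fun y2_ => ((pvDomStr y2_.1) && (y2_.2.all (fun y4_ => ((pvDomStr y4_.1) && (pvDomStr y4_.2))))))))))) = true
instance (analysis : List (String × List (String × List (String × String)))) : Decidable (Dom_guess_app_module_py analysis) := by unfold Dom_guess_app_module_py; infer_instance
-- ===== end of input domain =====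

-- B replaces A's three sequential priority scans and separate fallback by one stable
-- min-by-rank pass over the paths (objective: simpler). Return value only; no mutation.

-- shared helper: p.replace("/", ".").replace("\\", ".").rstrip(".py") — identical in both
-- Pythons. rstrip(chars) has no PySem primitive, so the right strip is hand-ported exactly:
-- drop trailing characters that belong to {'.', 'p', 'y'}.
def pvTransform (p : String) : String :=
  String.ofList (((PySem.Str.replace (PySem.Str.replace p "/" ".") "\\" ".").toList.reverse.dropWhile
      (fun c => c = '.' || c = 'p' || c = 'y')).reverse)

-- shared helper: both Pythons extract module_paths the same way (the isinstance(ps, dict)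
-- guard is always true under the type convention, since ps is always an association list)
def pvModulePaths (analysis : List (String × List (String × List (String × String)))) : List String :=
  ((PySem.Dict.mk ((PySem.Dict.mk analysis).getD "project_structure" [])).getD "module_paths" []).map (·.1)

-- ===== PORT A =====
def guess_app_module_py (analysis : List (String × List (String × List (String × String)))) : String :=
  let module_paths := pvModulePaths analysis
  -- for pref in ("main.py", "app.py"): for p in module_paths: … (outer 2-tuple loop unrolled)
  match module_paths.find? (fun p => PySem.Str.endswith (PySem.Str.lower p) "main.py") with
  | some p => pvTransform p
  | none =>
    match module_paths.find? (fun p => PySem.Str.endswith (PySem.Str.lower p) "app.py") with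
    | some p => pvTransform p
    | none =>
      match module_paths.find? (fun p => PySem.Str.isIn "api" (PySem.Str.lower p)) with
      | some p => pvTransform p
      | none =>
        match module_paths with
        | [] => "main"
        | p :: _ => pvTransform p

-- ===== PORT B =====
def pvRank (p : String) : Nat :=
  let q := PySem.Str.lower p
  if PySem.Str.endswith q "main.py" then 0
  else if PySem.Str.endswith q "app.py" then 1
  else if PySem.Str.isIn "api" q then 2
  else 3

def guess_app_module_py_alt (analysis : List (String × List (String × List (String × String)))) : String :=
  let module_paths := pvModulePaths analysis
  match PySem.List.min? module_paths pvRank with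
  | none => "main"                 -- if not module_paths: return "main"
  | some best => pvTransform best  -- min(module_paths, key=rank), then transform

-- ===== PRECONDITION & SPEC =====
def Spec_guess_app_module_py (analysis : List (String × List (String × List (String × String)))) (out : String) : Prop := out = guess_app_module_py_alt analysis
instance (analysis : List (String × List (String × List (String × String)))) (out : String) : Decidable (Spec_guess_app_module_py analysis out) := by unfold Spec_guess_app_module_py; infer_instance

-- ===== CLAIM (what is proved, stated in full; the proofs are below) =====
def Claim_equal_guess_app_module_py : Prop := ∀ (analysis : List (String × List (String × List (String × String)))), Dom_guess_app_module_py analysis → Spec_guess_app_module_py analysis (guess_app_module_py analysis)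

-- ===== LEMMAS AND PROOFS =====

-- the rank induced by three boolean predicates
def rank3 {α : Type} (p0 p1 p2 : α → Bool) (x : α) : Nat :=
  if p0 x then 0 else if p1 x then 1 else if p2 x then 2 else 3

-- the chained first-match selection A performs
def chain3 {α : Type} (p0 p1 p2 : α → Bool) (l : List α) : Option α :=
  match l.find? p0 with
  | some p => some p
  | none =>
    match l.find? p1 with
    | some p => some p
    | none =>
      match l.find? p2 with
      | some p => some p
      | none => l.head?

theorem foldl_min_step {α : Type} (key : α → Nat) :
    ∀ (t : List α) (m : α),
      t.foldl (fun acc x =>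
          match acc with
          | none => some x
          | some b => if key x < key b then some x else some b) (some m)
        = some (match PySem.List.min? t key with
                | none => m
                | some m' => if key m' < key m then m' else m) := by
  intro t
  induction t with
  | nil => intro m; simp [PySem.List.min?]
  | cons y t' ih =>
    intro m
    have hy := ih (if key y < key m then y else m)
    have hy' := ih y
    simp only [List.foldl_cons]
    rw [← apply_ite some, hy]
    have : PySem.List.min? (y :: t') key =
        some (match PySem.List.min? t' key with
              | none => y
              | some m' => if key m' < key y then m' else y) := by
      simp only [PySem.List.min?, List.foldl_cons]
      exact hy'
    rw [this]
    cases h : PySem.List.min? t' key with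
    | none => simp
    | some m' =>
      simp only
      split_ifs <;> simp_all <;> omega

theorem min?_cons_nat {α : Type} (key : α → Nat) (x : α) (t : List α) :
    PySem.List.min? (x :: t) key =
      some (match PySem.List.min? t key with
            | none => x
            | some m => if key m < key x then m else x) := by
  simp only [PySem.List.min?, List.foldl_cons]
  exact foldl_min_step key t x

theorem min?_cons_nat' {α : Type} (key : α → Nat) (x : α) (t : List α) :
    PySem.List.min? (x :: t) key =
      some ((PySem.List.min? t key).elim x (fun m => if key m < key x then m else x)) := by
  rw [min?_cons_nat]
  cases PySem.List.min? t key <;> rfl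

theorem min?_eq_chain3 {α : Type} (p0 p1 p2 : α → Bool) :
    ∀ (l : List α), PySem.List.min? l (rank3 p0 p1 p2) = chain3 p0 p1 p2 l := by
  intro l
  induction l with
  | nil => simp [PySem.List.min?, chain3]
  | cons x t ih =>
    rw [min?_cons_nat', chain3]
    cases h : PySem.List.min? t (rank3 p0 p1 p2) with
    | none =>
      -- t = [], every find? on t is none
      have ht : t = [] := (PySem.List.min?_eq_none_iff _ _).mp h
      subst ht
      simp only [chain3, List.find?_cons, List.find?_nil]
      by_cases h0 : p0 x <;> by_cases h1 : p1 x <;> by_cases h2 : p2 x <;>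
        simp [h0, h1, h2]
    | some m =>
      simp only [Option.elim_some]
      have hmem : m ∈ t := PySem.List.min?_mem h
      rw [chain3] at ih; rw [h] at ih
      -- analyse the three find?s on t through ih
      cases h0t : t.find? p0 with
      | some q =>
        rw [h0t] at ih
        have hq0 : p0 q := List.find?_some h0t
        have hm : m = q := by simpa using ih
        subst hm
        have hr : rank3 p0 p1 p2 m = 0 := by simp [rank3, hq0]
        by_cases h0 : p0 x
        · have hrx : rank3 p0 p1 p2 x = 0 := by simp [rank3, h0]
          rw [hr, hrx]
          simp [List.find?_cons, h0]
        · have hrx : 0 < rank3 p0 p1 p2 x := by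
            have hb0 : p0 x = false := by simpa using h0
            simp only [rank3, hb0, Bool.false_eq_true, if_false]
            first | omega | (split_ifs <;> omega)
          rw [hr, if_pos hrx]
          simp [List.find?_cons, h0, h0t]
      | none =>
        rw [h0t] at ih
        have hnot0 : ∀ y ∈ t, ¬ p0 y = true := fun y hy => List.find?_eq_none.mp h0t y hy
        cases h1t : t.find? p1 with
        | some q =>
          rw [h1t] at ih
          have hq1 : p1 q := List.find?_some h1t
          have hm : m = q := by simpa using ih
          subst hm
          have hr : rank3 p0 p1 p2 m = 1 := by
            simp [rank3, hq1, hnot0 m hmem]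
          by_cases h0 : p0 x
          · have hrx : rank3 p0 p1 p2 x = 0 := by simp [rank3, h0]
            rw [hr, hrx]
            simp [List.find?_cons, h0]
          · by_cases h1 : p1 x
            · have hrx : rank3 p0 p1 p2 x = 1 := by simp [rank3, h0, h1]
              rw [hr, hrx]
              simp [List.find?_cons, h0, h1, h0t]
            · have hrx : 1 < rank3 p0 p1 p2 x := by
                have hb0 : p0 x = false := by simpa using h0
                have hb1 : p1 x = false := by simpa using h1
                simp only [rank3, hb0, hb1, Bool.false_eq_true, if_false]
                first | omega | (split_ifs <;> omega)
              rw [hr, if_pos hrx]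
              simp [List.find?_cons, h0, h1, h0t, h1t]
        | none =>
          rw [h1t] at ih
          have hnot1 : ∀ y ∈ t, ¬ p1 y = true := fun y hy => List.find?_eq_none.mp h1t y hy
          cases h2t : t.find? p2 with
          | some q =>
            rw [h2t] at ih
            have hq2 : p2 q := List.find?_some h2t
            have hm : m = q := by simpa using ih
            subst hm
            have hr : rank3 p0 p1 p2 m = 2 := by
              simp [rank3, hq2, hnot0 m hmem, hnot1 m hmem]
            by_cases h0 : p0 x
            · have hrx : rank3 p0 p1 p2 x = 0 := by simp [rank3, h0]
              rw [hr, hrx]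
              simp [List.find?_cons, h0]
            · by_cases h1 : p1 x
              · have hrx : rank3 p0 p1 p2 x = 1 := by simp [rank3, h0, h1]
                rw [hr, hrx]
                simp [List.find?_cons, h0, h1, h0t]
              · by_cases h2 : p2 x
                · have hrx : rank3 p0 p1 p2 x = 2 := by simp [rank3, h0, h1, h2]
                  rw [hr, hrx]
                  simp [List.find?_cons, h0, h1, h2, h0t, h1t]
                · have hrx : 2 < rank3 p0 p1 p2 x := by
                    have hb0 : p0 x = false := by simpa using h0
                    have hb1 : p1 x = false := by simpa using h1
                    have hb2 : p2 x = false := by simpa using h2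
                    simp only [rank3, hb0, hb1, hb2, Bool.false_eq_true, if_false]
                    first | omega | (split_ifs <;> omega)
                  rw [hr, if_pos hrx]
                  simp [List.find?_cons, h0, h1, h2, h0t, h1t, h2t]
          | none =>
            rw [h2t] at ih
            have hnot2 : ∀ y ∈ t, ¬ p2 y = true := fun y hy => List.find?_eq_none.mp h2t y hy
            have hr : rank3 p0 p1 p2 m = 3 := by
              simp [rank3, hnot0 m hmem, hnot1 m hmem, hnot2 m hmem]
            have hrx : ¬ rank3 p0 p1 p2 m < rank3 p0 p1 p2 x := by
              rw [hr]; simp only [rank3]; split_ifs <;> omega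
            rw [if_neg hrx]
            by_cases h0 : p0 x
            · simp [List.find?_cons, h0]
            · by_cases h1 : p1 x
              · simp [List.find?_cons, h0, h1, h0t]
              · by_cases h2 : p2 x
                · simp [List.find?_cons, h0, h1, h2, h0t, h1t]
                · simp [List.find?_cons, h0, h1, h2, h0t, h1t, h2t]

theorem pvRank_eq_rank3 : pvRank = rank3
    (fun p => PySem.Str.endswith (PySem.Str.lower p) "main.py")
    (fun p => PySem.Str.endswith (PySem.Str.lower p) "app.py")
    (fun p => PySem.Str.isIn "api" (PySem.Str.lower p)) := by
  funext p
  simp [pvRank, rank3]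

-- ===== VERDICT (by name: the statement is the Claim_ definition above) =====
theorem guess_app_module_py_key (l : List String) :
    (match l.find? (fun p => PySem.Str.endswith (PySem.Str.lower p) "main.py") with
     | some p => pvTransform p
     | none =>
       match l.find? (fun p => PySem.Str.endswith (PySem.Str.lower p) "app.py") with
       | some p => pvTransform p
       | none =>
         match l.find? (fun p => PySem.Str.isIn "api" (PySem.Str.lower p)) with
         | some p => pvTransform p
         | none =>
           match l with
           | [] => "main"
           | p :: _ => pvTransform p)
    = match PySem.List.min? l pvRank with
      | none => "main"
      | some best => pvTransform best := by
  rw [pvRank_eq_rank3, min?_eq_chain3]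
  unfold chain3
  cases h0 : l.find? (fun p => PySem.Str.endswith (PySem.Str.lower p) "main.py") <;>
    cases h1 : l.find? (fun p => PySem.Str.endswith (PySem.Str.lower p) "app.py") <;>
      cases h2 : l.find? (fun p => PySem.Str.isIn "api" (PySem.Str.lower p)) <;>
        cases hl : l <;> simp_all

theorem guess_app_module_py_spec : Claim_equal_guess_app_module_py := by
  intro analysis _
  exact guess_app_module_py_key (pvModulePaths analysis)
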